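-- pv_equiv track=rewrite | github.com/diwadd/sport | cf_even_path.py | mark_sectors
-- ===== SOURCE A (Python) =====
-- def mark_sectors(n, s):
--     marks = [0 for i in range(n + 1)]
--
--     current_mark = 0
--     prev = s[0] % 2
--
--     for i in range(1, n):
--         p = s[i] % 2
--
--         if prev == p:
--             marks[i+1] = current_mark
--         else:
--             current_mark += 1
--             prev = p
--             marks[i+1] = current_mark
--
--     return marks
-- ===== SOURCE B (Python) =====
-- def mark_sectors(n, s):
--     cur = s[0] % 2
--     runs = []
--     length = 0
--     for i in range(n):
--         p = s[i] % 2
--         if p == cur: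
--             length += 1
--         else:
--             runs.append(length)
--             cur = p
--             length = 1
--     runs.append(length)
--     body = []
--     for b, run_len in enumerate(runs):
--         body.extend([b] * run_len)
--     return ([0] + body)[:max(n + 1, 0)]
-- ===== Notes on version B (the rewrite author's own statement) =====
-- stated objective: alternative
-- what changed: A counts parity changes with a single accumulator loop writing marks in place; B instead run-length-encodes s into maximal blocks of equal parity and then builds the result by emitting each block's index repeated by its run length.
import Mathlib
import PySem

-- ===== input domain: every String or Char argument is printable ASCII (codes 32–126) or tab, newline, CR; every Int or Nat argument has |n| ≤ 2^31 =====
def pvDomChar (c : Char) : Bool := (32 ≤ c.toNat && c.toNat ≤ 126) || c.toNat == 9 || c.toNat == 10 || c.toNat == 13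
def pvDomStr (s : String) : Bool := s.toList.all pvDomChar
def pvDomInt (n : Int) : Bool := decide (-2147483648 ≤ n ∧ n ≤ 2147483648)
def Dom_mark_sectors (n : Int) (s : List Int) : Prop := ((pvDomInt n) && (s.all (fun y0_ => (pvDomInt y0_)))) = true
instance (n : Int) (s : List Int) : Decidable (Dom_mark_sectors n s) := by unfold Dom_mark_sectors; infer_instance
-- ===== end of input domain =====

-- B replaces A's accumulator loop writing marks in place by run-length-encoding s into maximal
-- equal-parity blocks and emitting each block's index repeated by its run length (alternative).

-- ===== PORT A =====
def mark_sectors (n : Int) (s : List Int) : List Int :=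
  let marks := (PySem.List.pyRange 0 (n + 1) 1).map (fun _ => (0 : Int))
  let current_mark : Int := 0
  let prev := PySem.Int.mod (PySem.List.pyGetD s 0 0) 2
  let st := (PySem.List.pyRange 1 n 1).foldl
    (fun (st : List Int × Int × Int) i =>
      let p := PySem.Int.mod (PySem.List.pyGetD s i 0) 2
      if st.2.2 == p then
        (PySem.List.pySetD st.1 (i + 1) st.2.1, st.2.1, st.2.2)
      else
        (PySem.List.pySetD st.1 (i + 1) (st.2.1 + 1), st.2.1 + 1, p))
    (marks, current_mark, prev)
  st.1

-- ===== PORT B =====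
def mark_sectors_alt (n : Int) (s : List Int) : List Int :=
  let cur0 := PySem.Int.mod (PySem.List.pyGetD s 0 0) 2
  let st := (PySem.List.pyRange 0 n 1).foldl
    (fun (st : List Int × Int × Int) i =>
      let p := PySem.Int.mod (PySem.List.pyGetD s i 0) 2
      if p == st.2.1 then (st.1, st.2.1, st.2.2 + 1)
      else (st.1 ++ [st.2.2], p, 1))
    ([], cur0, 0)
  let runs := st.1 ++ [st.2.2]
  let body := (PySem.List.enumerate runs).foldl
    (fun acc brl => acc ++ PySem.List.pyRepeat [brl.1] brl.2) []
  ((0 : Int) :: body).take (max (n + 1) 0).toNat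

-- ===== PRECONDITION & SPEC =====
-- Pre_ excludes exactly the inputs on which Python A raises IndexError: empty s (the
-- unconditional s[0]) or n > len(s) (the loop's s[i]).
def Pre_mark_sectors (n : Int) (s : List Int) : Prop := s ≠ [] ∧ n ≤ s.length
instance (n : Int) (s : List Int) : Decidable (Pre_mark_sectors n s) := by
  unfold Pre_mark_sectors; infer_instance
def pvWitness_mark_sectors : Int × List Int := (5, [1, 2, 2, 3, 5])

def Spec_mark_sectors (n : Int) (s : List Int) (out : List Int) : Prop := out = mark_sectors_alt n s
instance (n : Int) (s : List Int) (out : List Int) : Decidable (Spec_mark_sectors n s out) := by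
  unfold Spec_mark_sectors; infer_instance

-- ===== CLAIM (what is proved, stated in full; the proofs are below) =====
def Claim_equal_mark_sectors : Prop := ∀ (n : Int) (s : List Int), Dom_mark_sectors n s → Pre_mark_sectors n s → Spec_mark_sectors n s (mark_sectors n s)

-- ===== LEMMAS AND PROOFS =====

-- parity of s[i], the value both programs compare
def pvPar (s : List Int) (i : Int) : Int := PySem.Int.mod (PySem.List.pyGetD s i 0) 2

-- number of parity changes among positions 1..i
def pvCnt (s : List Int) : Nat → Int
  | 0 => 0
  | i + 1 => pvCnt s i + (if pvPar s ((i : Int) + 1) = pvPar s (i : Int) then 0 else 1)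

-- B's second loop: emit the block index once per element of each run
def pvEmit (rs : List Int) : List Int :=
  (PySem.List.enumerate rs).foldl
    (fun acc brl => acc ++ PySem.List.pyRepeat [brl.1] brl.2) []

def pvEmitAcc (rs : List Int) (l : Int) : List Int :=
  pvEmit rs ++ List.replicate l.toNat (rs.length : Int)

lemma emit_append_singleton (rs : List Int) (l : Int) :
    pvEmit (rs ++ [l]) = pvEmitAcc rs l := by
  unfold pvEmitAcc pvEmit
  rw [PySem.List.foldl_append_eq_flatMap, PySem.List.foldl_append_eq_flatMap,
      PySem.List.enumerate_append]
  simp [PySem.List.enumerate_cons, PySem.List.pyRepeat_singleton]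

lemma set_append_len (xs : List Int) (y v : Int) (ys : List Int) :
    (xs ++ y :: ys).set xs.length v = xs ++ v :: ys := by
  induction xs with
  | nil => simp
  | cons a t ih => simp [ih]

-- A's initial marks list is all zeros
lemma marks_init (n : Int) :
    (PySem.List.pyRange 0 (n + 1) 1).map (fun _ => (0 : Int))
      = List.replicate (n + 1).toNat (0 : Int) := by
  rw [List.eq_replicate_iff]
  constructor
  · simp [PySem.List.length_pyRange_one]
  · intro b hb
    simp only [List.mem_map] at hb
    rcases hb with ⟨_, _, h⟩
    exact h.symm

-- the change-count recurrence, stated at a Nat index j ≥ 1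
lemma cnt_step (s : List Int) (j : Nat) (hj : 1 ≤ j) :
    pvCnt s j = pvCnt s (j - 1) +
      (if pvPar s ((j : Int)) = pvPar s ((j : Int) - 1) then 0 else 1) := by
  obtain ⟨k, rfl⟩ : ∃ k, j = k + 1 := ⟨j - 1, by omega⟩
  simp only [pvCnt, Nat.add_sub_cancel]
  have e : ((k + 1 : Nat) : Int) = (k : Int) + 1 := by push_cast; ring
  rw [e, show (k : Int) + 1 - 1 = (k : Int) by ring]

-- A's loop invariant: marks already holds the change counts for positions below j
lemma loopA (s : List Int) (n : Int) : ∀ (fuel : Nat) (j : Nat),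
    1 ≤ j → (j : Int) ≤ n → (n - j).toNat ≤ fuel →
    ((PySem.List.pyRange j n 1).foldl
      (fun (st : List Int × Int × Int) i =>
        let p := PySem.Int.mod (PySem.List.pyGetD s i 0) 2
        if st.2.2 == p then
          (PySem.List.pySetD st.1 (i + 1) st.2.1, st.2.1, st.2.2)
        else
          (PySem.List.pySetD st.1 (i + 1) (st.2.1 + 1), st.2.1 + 1, p))
      (0 :: (List.range j).map (fun k => pvCnt s k) ++ List.replicate (n - j).toNat 0,
       pvCnt s (j - 1), pvPar s ((j : Int) - 1))).1
    = 0 :: (List.range n.toNat).map (fun k => pvCnt s k) := by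
  intro fuel
  induction fuel with
  | zero =>
    intro j hj hjn hf
    have hnj : n ≤ (j : Int) := by omega
    rw [PySem.List.pyRange_one_eq_nil hnj]
    have h1 : n.toNat = j := by omega
    simp [h1, show (n - (j : Int)).toNat = 0 by omega]
  | succ m ih =>
    intro j hj hjn hf
    by_cases hlt : (j : Int) < n
    · rw [PySem.List.pyRange_one_cons hlt, List.foldl_cons]
      have hcj := cnt_step s j hj
      have hsplit : (0 :: (List.range j).map (fun k => pvCnt s k) ++
            List.replicate (n - (j : Int)).toNat 0)
          = (0 :: (List.range j).map (fun k => pvCnt s k)) ++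
            ((0 : Int) :: List.replicate (n - (j : Int) - 1).toNat 0) := by
        have h2 : (n - (j : Int)).toNat = (n - (j : Int) - 1).toNat + 1 := by omega
        rw [h2, List.replicate_succ]
      have hset : ∀ v : Int,
          PySem.List.pySetD (0 :: (List.range j).map (fun k => pvCnt s k) ++
              List.replicate (n - (j : Int)).toNat 0) ((j : Int) + 1) v
          = (0 :: (List.range j).map (fun k => pvCnt s k)) ++
              v :: List.replicate (n - (j : Int) - 1).toNat 0 := by
        intro v
        rw [hsplit]
        have hcast : (j : Int) + 1 = ((j + 1 : Nat) : Int) := by push_cast; ring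
        rw [hcast, PySem.List.pySetD_natCast]
        have hlen : (0 :: (List.range j).map (fun k => pvCnt s k)).length = j + 1 := by simp
        rw [← hlen, set_append_len]
      have emarks : ∀ v : Int, v = pvCnt s j →
          (0 :: (List.range j).map (fun k => pvCnt s k)) ++
              v :: List.replicate (n - (j : Int) - 1).toNat 0
          = 0 :: (List.range (j + 1)).map (fun k => pvCnt s k) ++
              List.replicate (n - ((j : Int) + 1)).toNat 0 := by
        intro v hv
        subst hv
        simp only [List.range_succ, List.map_append, List.map_cons, List.map_nil]
        have h3 : (n - (j : Int) - 1).toNat = (n - ((j : Int) + 1)).toNat := by omega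
        simp [h3]
      have hstep := ih (j + 1) (by omega) (by push_cast; omega) (by omega)
      have e1 : ((j + 1 : Nat) : Int) = (j : Int) + 1 := by push_cast; ring
      have e2 : (j + 1) - 1 = j := by omega
      rw [e1, e2, show (j : Int) + 1 - 1 = (j : Int) by ring] at hstep
      simp only
      by_cases hp : pvPar s ((j : Int) - 1) = pvPar s ((j : Int))
      · have hbeq : (pvPar s ((j : Int) - 1) == PySem.Int.mod (PySem.List.pyGetD s (j : Int) 0) 2) = true := by
          simpa [pvPar] using hp
        simp only [hbeq, if_true]
        have hcnt : pvCnt s (j - 1) = pvCnt s j := by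
          rw [hcj, if_pos hp.symm]; ring
        rw [hset, emarks _ hcnt, hcnt, hp]
        exact hstep
      · have hbeq : (pvPar s ((j : Int) - 1) == PySem.Int.mod (PySem.List.pyGetD s (j : Int) 0) 2) = false := by
          simpa [pvPar] using hp
        simp only [hbeq, Bool.false_eq_true, if_false]
        have hcnt : pvCnt s (j - 1) + 1 = pvCnt s j := by
          rw [hcj, if_neg (fun h => hp h.symm)]
        rw [hset, emarks _ hcnt, hcnt]
        have hpar : PySem.Int.mod (PySem.List.pyGetD s (j : Int) 0) 2 = pvPar s ((j : Int)) := rfl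
        rw [hpar]
        exact hstep
    · have hnj : n ≤ (j : Int) := by omega
      rw [PySem.List.pyRange_one_eq_nil hnj]
      have h1 : n.toNat = j := by omega
      simp [h1, show (n - (j : Int)).toNat = 0 by omega]

-- B's loop invariant: the runs found so far, flattened with block indices, list the counts
lemma loopB (s : List Int) (n : Int) : ∀ (fuel : Nat) (j : Nat) (runs : List Int) (len : Int),
    1 ≤ j → (j : Int) ≤ n → (n - j).toNat ≤ fuel → 0 ≤ len →
    (runs.length : Int) = pvCnt s (j - 1) →
    pvEmitAcc runs len = (List.range j).map (fun k => pvCnt s k) →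
    (fun st : List Int × Int × Int =>
        pvEmitAcc st.1 st.2.2 = (List.range n.toNat).map (fun k => pvCnt s k))
      ((PySem.List.pyRange j n 1).foldl
        (fun (st : List Int × Int × Int) i =>
          let p := PySem.Int.mod (PySem.List.pyGetD s i 0) 2
          if p == st.2.1 then (st.1, st.2.1, st.2.2 + 1)
          else (st.1 ++ [st.2.2], p, 1))
        (runs, pvPar s ((j : Int) - 1), len)) := by
  intro fuel
  induction fuel with
  | zero =>
    intro j runs len hj hjn hf hl hcl hacc
    have hnj : n ≤ (j : Int) := by omega
    rw [PySem.List.pyRange_one_eq_nil hnj]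
    have h1 : n.toNat = j := by omega
    simpa [h1] using hacc
  | succ m ih =>
    intro j runs len hj hjn hf hl hcl hacc
    by_cases hlt : (j : Int) < n
    · rw [PySem.List.pyRange_one_cons hlt, List.foldl_cons]
      have hcj := cnt_step s j hj
      simp only
      by_cases hp : pvPar s ((j : Int)) = pvPar s ((j : Int) - 1)
      · have hbeq : (PySem.Int.mod (PySem.List.pyGetD s (j : Int) 0) 2 == pvPar s ((j : Int) - 1)) = true := by
          simpa [pvPar] using hp
        simp only [hbeq, if_true]
        have hcnt : pvCnt s j = pvCnt s (j - 1) := by rw [hcj, if_pos hp]; ring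
        have hacc' : pvEmitAcc runs (len + 1) = (List.range (j + 1)).map (fun k => pvCnt s k) := by
          unfold pvEmitAcc at hacc ⊢
          rw [show (len + 1).toNat = len.toNat + 1 by omega, List.replicate_succ',
              ← List.append_assoc, hacc, List.range_succ, List.map_append]
          simp only [List.map_cons, List.map_nil]
          rw [hcl, hcnt]
        have hstep := ih (j + 1) runs (len + 1) (by omega) (by push_cast; omega) (by omega)
          (by omega) (by rw [show (j + 1) - 1 = j by omega, hcnt]; exact hcl) hacc'
        have e1 : ((j + 1 : Nat) : Int) = (j : Int) + 1 := by push_cast; ring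
        rw [e1, show (j : Int) + 1 - 1 = (j : Int) by ring] at hstep
        rw [← hp]
        exact hstep
      · have hbeq : (PySem.Int.mod (PySem.List.pyGetD s (j : Int) 0) 2 == pvPar s ((j : Int) - 1)) = false := by
          simpa [pvPar] using hp
        simp only [hbeq, Bool.false_eq_true, if_false]
        have hcnt : pvCnt s j = pvCnt s (j - 1) + 1 := by rw [hcj, if_neg hp]
        have hlen' : (((runs ++ [len]).length : Nat) : Int) = pvCnt s ((j + 1) - 1) := by
          rw [show (j + 1) - 1 = j by omega, hcnt, ← hcl]
          simp only [List.length_append, List.length_cons, List.length_nil]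
          push_cast
          ring
        have hacc' : pvEmitAcc (runs ++ [len]) 1 = (List.range (j + 1)).map (fun k => pvCnt s k) := by
          show pvEmit (runs ++ [len]) ++
              List.replicate ((1 : Int)).toNat (((runs ++ [len]).length : Int)) = _
          rw [emit_append_singleton, hacc]
          have hL : List.replicate ((1 : Int)).toNat (((runs ++ [len]).length : Int))
              = [pvCnt s j] := by
            have h4 : (((runs ++ [len]).length : Nat) : Int) = pvCnt s j := by
              rw [hcnt, ← hcl]
              simp only [List.length_append, List.length_cons, List.length_nil]
              push_cast
              ring
            rw [show ((1 : Int)).toNat = 1 from rfl, h4]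
            rfl
          rw [hL, List.range_succ, List.map_append]
          simp
        have hstep := ih (j + 1) (runs ++ [len]) 1 (by omega) (by push_cast; omega) (by omega)
          (by omega) hlen' hacc'
        have e1 : ((j + 1 : Nat) : Int) = (j : Int) + 1 := by push_cast; ring
        rw [e1, show (j : Int) + 1 - 1 = (j : Int) by ring] at hstep
        have hpar : PySem.Int.mod (PySem.List.pyGetD s (j : Int) 0) 2 = pvPar s ((j : Int)) := rfl
        rw [hpar]
        exact hstep
    · have hnj : n ≤ (j : Int) := by omega
      rw [PySem.List.pyRange_one_eq_nil hnj]
      have h1 : n.toNat = j := by omega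
      simpa [h1] using hacc

-- ===== VERDICT (by name: the statement is the Claim_ definition above) =====
theorem mark_sectors_spec : Claim_equal_mark_sectors := by
  intro n s _ _
  unfold Spec_mark_sectors mark_sectors mark_sectors_alt
  simp only
  have hemit : ∀ X : List Int,
      (PySem.List.enumerate X).foldl
        (fun acc brl => acc ++ PySem.List.pyRepeat [brl.1] brl.2) ([] : List Int) = pvEmit X :=
    fun _ => rfl
  by_cases hn : n ≤ 0
  · rw [PySem.List.pyRange_one_eq_nil (show n ≤ 1 by omega),
        PySem.List.pyRange_one_eq_nil (show n ≤ 0 by omega)]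
    simp only [List.foldl_nil]
    rw [marks_init, hemit, emit_append_singleton]
    unfold pvEmitAcc pvEmit
    simp only [PySem.List.enumerate_nil, List.foldl_nil, List.length_nil, Nat.cast_zero,
      List.nil_append]
    rcases (show n = 0 ∨ n < 0 by omega) with h0 | h0
    · subst h0; rfl
    · rw [show (n + 1).toNat = 0 by omega, show (max (n + 1) 0).toNat = 0 by omega]
      simp
  · rw [not_le] at hn
    -- A side
    rw [marks_init]
    have hinit : List.replicate (n + 1).toNat (0 : Int)
        = 0 :: (List.range (1 : Nat)).map (fun k => pvCnt s k) ++
            List.replicate (n - (1 : Int)).toNat 0 := by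
      have h5 : (n + 1).toNat = (n - 1).toNat + 2 := by omega
      simp [h5, List.replicate_succ, List.range_succ, pvCnt]
    have hA := loopA s n (n - 1).toNat 1 (le_refl 1) (by push_cast; omega) (by omega)
    rw [show ((1 : Nat) : Int) = (1 : Int) by norm_num, show (1 : Int) - 1 = 0 by ring,
        show (1 : Nat) - 1 = 0 by omega] at hA
    rw [hinit]
    rw [show pvCnt s 0 = (0 : Int) from rfl, show pvPar s 0 = PySem.Int.mod (PySem.List.pyGetD s 0 0) 2 from rfl] at hA
    rw [hA]
    -- B side
    rw [PySem.List.pyRange_one_cons (show (0 : Int) < n by omega), List.foldl_cons]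
    simp only [beq_self_eq_true, if_true]
    have hB := loopB s n (n - 1).toNat 1 [] 1 (le_refl 1) (by push_cast; omega) (by omega)
      (by omega)
      (by simp [pvCnt])
      (by simp [pvEmitAcc, pvEmit, PySem.List.enumerate_nil, List.range_succ, pvCnt])
    rw [show ((1 : Nat) : Int) = (1 : Int) by norm_num, show (1 : Int) - 1 = 0 by ring] at hB
    rw [show pvPar s 0 = PySem.Int.mod (PySem.List.pyGetD s 0 0) 2 from rfl] at hB
    simp only at hB
    rw [show (0 : Int) + 1 = 1 from rfl]
    rw [hemit, emit_append_singleton, hB]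
    rw [List.take_of_length_le (by simp; omega)]
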